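-- pv_equiv track=rewrite | github.com/julio-lopezsanz/python-learning-journey | patrones_en_diccionarios/agrupacion_acumulacion_conteo.py | purchases_per_person
-- ===== SOURCE A (Python) =====
-- def purchases_per_person(sales_data):
--     """
--     Devuelve un diccionario con:
--         - monto total de compras y cantidad total de compras por persona
--     """
--
--     grouped = {}
--
--     for user, amount in sales_data:
--         if user not in grouped:
--             grouped[user] = {"total": 0, "purchases": 0}
--
--         grouped[user]["total"] += amount
--         grouped[user]["purchases"] += 1
--
--     #solucion pythonica:
--     #data = grouped.get(user, {"total": 0, "purchases": 0})
--         #data["total"] += amount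
--         #data["purchases"] += 1
--         #grouped[user] = data
--
--     return grouped
-- ===== SOURCE B (Python) =====
-- def purchases_per_person(sales_data):
--     """
--     Devuelve un diccionario con:
--         - monto total de compras y cantidad total de compras por persona
--     """
--     users = list(dict.fromkeys(user for user, _ in sales_data))
--     return {user: {"total": sum(a for u, a in sales_data if u == user),
--                    "purchases": sum(1 for u, _ in sales_data if u == user)}
--             for user in users}
-- ===== Notes on version B (the rewrite author's own statement) =====
-- stated objective: alternative
-- what changed: Instead of one streaming pass that mutates a nested per-user record under a membership guard, B first extracts the distinct users in first-appearance order (dict.fromkeys) and then, per user, re-scans sales_data to sum that user's amounts and count that user's rows (group-by-filter), assembling the result in a comprehension.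
import Mathlib
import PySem

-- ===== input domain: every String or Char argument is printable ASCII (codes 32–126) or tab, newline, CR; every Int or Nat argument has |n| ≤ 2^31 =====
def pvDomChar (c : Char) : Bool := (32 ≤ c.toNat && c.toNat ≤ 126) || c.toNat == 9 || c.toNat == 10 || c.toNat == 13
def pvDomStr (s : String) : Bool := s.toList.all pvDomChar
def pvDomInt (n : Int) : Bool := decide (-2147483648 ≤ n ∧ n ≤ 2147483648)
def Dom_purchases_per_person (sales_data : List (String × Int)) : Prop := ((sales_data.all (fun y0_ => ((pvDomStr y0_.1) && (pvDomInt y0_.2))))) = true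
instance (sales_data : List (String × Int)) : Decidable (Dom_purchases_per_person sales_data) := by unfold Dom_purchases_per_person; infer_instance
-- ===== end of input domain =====

-- B replaces A's single streaming pass that mutates a nested per-user record under a membership
-- guard by a group-by-filter scheme: extract the distinct users in first-appearance order, then
-- re-scan the data per user to sum amounts and count rows — an alternative algorithm, same results.


-- ===== PORT A =====
-- one loop step of A's `for user, amount in sales_data:` body
def ppStepA (grouped : PySem.Dict String (PySem.Dict String Int)) (p : String × Int) :
    PySem.Dict String (PySem.Dict String Int) :=
  let grouped := if grouped.contains p.1 then grouped
                 else grouped.insert p.1 (PySem.Dict.ofList [("total", (0:Int)), ("purchases", 0)])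
  -- grouped[user]["total"] += amount  /  grouped[user]["purchases"] += 1 :
  -- Dict.modify is d[k] = f(d.get(k, dflt)); exact here since the key is always present
  -- after the guard, and the inner keys "total"/"purchases" are always present.
  let grouped := grouped.modify p.1 PySem.Dict.empty
                   (fun d => d.insert "total" (d.getD "total" 0 + p.2))
  grouped.modify p.1 PySem.Dict.empty
    (fun d => d.insert "purchases" (d.getD "purchases" 0 + 1))

def purchases_per_person (sales_data : List (String × Int)) : List (String × List (String × Int)) :=
  -- return grouped (a dict of dicts), rendered as association lists per the type convention
  ((sales_data.foldl ppStepA PySem.Dict.empty).items.map (fun q => (q.1, q.2.items)))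

-- ===== PORT B =====
def purchases_per_person_alt (sales_data : List (String × Int)) : List (String × List (String × Int)) :=
  -- users = list(dict.fromkeys(user for user, _ in sales_data))
  let users := PySem.List.dedup (sales_data.map (·.1))
  -- {user: {"total": sum(a for u, a in sales_data if u == user),
  --         "purchases": sum(1 for u, _ in sales_data if u == user)} for user in users}
  users.map (fun user =>
    (user, [("total", ((sales_data.filter (fun q => q.1 == user)).map (·.2)).sum),
            ("purchases", ((sales_data.filter (fun q => q.1 == user)).length : Int))]))

-- ===== PRECONDITION & SPEC =====
def Spec_purchases_per_person (sales_data : List (String × Int)) (out : List (String × List (String × Int))) : Prop := out = purchases_per_person_alt sales_data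
instance (sales_data : List (String × Int)) (out : List (String × List (String × Int))) : Decidable (Spec_purchases_per_person sales_data out) := by unfold Spec_purchases_per_person; infer_instance

-- ===== CLAIM (what is proved, stated in full; the proofs are below) =====
def Claim_equal_purchases_per_person : Prop := ∀ (sales_data : List (String × Int)), Dom_purchases_per_person sales_data → Spec_purchases_per_person sales_data (purchases_per_person sales_data)

-- ===== LEMMAS AND PROOFS =====

-- List-level model of A's per-user state: (user, running total, running count) triples
-- in first-appearance order.
def ppUpd (tl : List (String × Int × Int)) (p : String × Int) : List (String × Int × Int) :=
  if (tl.map (·.1)).contains p.1 then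
    tl.map (fun x => if x.1 == p.1 then (x.1, x.2.1 + p.2, x.2.2 + 1) else x)
  else tl ++ [(p.1, p.2, 1)]

-- render of the model as A's dict-of-dicts state
def ppRA (tl : List (String × Int × Int)) : PySem.Dict String (PySem.Dict String Int) :=
  PySem.Dict.mk (tl.map (fun x => (x.1, PySem.Dict.mk [("total", x.2.1), ("purchases", x.2.2)])))

-- B's group-by-filter result as a model list
def ppModel (sd : List (String × Int)) : List (String × Int × Int) :=
  (PySem.List.dedup (sd.map (·.1))).map (fun u =>
    (u, ((sd.filter (fun q => q.1 == u)).map (·.2)).sum,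
        ((sd.filter (fun q => q.1 == u)).length : Int)))

theorem ppUpd_keys (tl : List (String × Int × Int)) (p : String × Int) :
    (ppUpd tl p).map (·.1) = if (tl.map (·.1)).contains p.1 then tl.map (·.1)
                             else tl.map (·.1) ++ [p.1] := by
  unfold ppUpd
  split_ifs with h
  · simp only [List.map_map]
    refine List.map_congr_left (fun x _ => ?_)
    by_cases hx : x.1 = p.1 <;> simp [hx]
  · simp

theorem ppUpd_nodup (tl : List (String × Int × Int)) (p : String × Int)
    (h : (tl.map (·.1)).Nodup) : ((ppUpd tl p).map (·.1)).Nodup := by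
  rw [ppUpd_keys]
  split_ifs with hc
  · exact h
  · have hp : p.1 ∉ tl.map (·.1) := fun hm => hc (by simpa using hm)
    simp only [List.nodup_append, h, List.nodup_cons, List.not_mem_nil, not_false_iff,
      List.nodup_nil, and_true, true_and]
    intro a hax y hy ha
    exact hp (by rw [← List.mem_singleton.mp hy, ← ha]; exact hax)

-- with unique keys, the entry found at a key is the member with that key
theorem ppKeyUnique {tl : List (String × Int × Int)} (h : (tl.map (·.1)).Nodup)
    {x y : String × Int × Int} (hx : x ∈ tl) (hy : y ∈ tl) (hk : x.1 = y.1) : x = y := by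
  induction tl with
  | nil => cases hx
  | cons a l ih =>
    simp only [List.map_cons, List.nodup_cons] at h
    rcases List.mem_cons.1 hx with rfl | hx' <;> rcases List.mem_cons.1 hy with rfl | hy'
    · rfl
    · exact absurd (by rw [hk]; exact List.mem_map_of_mem hy') h.1
    · exact absurd (by rw [← hk]; exact List.mem_map_of_mem hx') h.1
    · exact ih h.2 hx' hy'

theorem ppRA_keys (tl : List (String × Int × Int)) : (ppRA tl).keys = tl.map (·.1) := by
  simp [ppRA, PySem.Dict.keys_mk, List.map_map, Function.comp]

theorem ppRA_contains (tl : List (String × Int × Int)) (u : String) :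
    (ppRA tl).contains u = (tl.map (·.1)).contains u := by
  unfold ppRA
  rw [PySem.Dict.contains_mk, List.any_map, List.contains_eq_any_beq, List.any_map]
  exact PySem.List.any_congr_mem (fun x _ => by simp [eq_comm])

-- the per-key update maps of the model preserve the key list
theorem ppMapIf_keys (tl : List (String × Int × Int)) (u : String)
    (g : Int → Int → Int × Int) :
    ((tl.map (fun x => if x.1 == u then (x.1, (g x.2.1 x.2.2).1, (g x.2.1 x.2.2).2) else x)).map (·.1))
      = tl.map (·.1) := by
  rw [List.map_map]
  refine List.map_congr_left (fun x _ => ?_)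
  by_cases hx : x.1 = u <;> simp [hx]

-- grouped[u] = F(grouped[u]) on a rendered state with u present is a per-key map of the model
theorem modifyA_render (tl : List (String × Int × Int)) (h : (tl.map (·.1)).Nodup)
    {u : String} (hm : u ∈ tl.map (·.1))
    (F : PySem.Dict String Int → PySem.Dict String Int) (g : Int → Int → Int × Int)
    (hF : ∀ t c : Int, F (PySem.Dict.mk [("total", t), ("purchases", c)])
            = PySem.Dict.mk [("total", (g t c).1), ("purchases", (g t c).2)]) :
    (ppRA tl).modify u PySem.Dict.empty F
      = ppRA (tl.map (fun x => if x.1 == u then (x.1, (g x.2.1 x.2.2).1, (g x.2.1 x.2.2).2) else x)) := by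
  obtain ⟨x0, hx0, hk0⟩ := List.mem_map.1 hm
  have hget : (ppRA tl).getD u PySem.Dict.empty
      = PySem.Dict.mk [("total", x0.2.1), ("purchases", x0.2.2)] := by
    refine PySem.Dict.getD_of_mem_items _ ?_ ?_ _
    · rw [← hk0]; exact List.mem_map_of_mem hx0
    · rw [ppRA_keys]; exact h
  have hcont : (ppRA tl).contains u = true := by
    rw [ppRA_contains]; simpa using hm
  show (ppRA tl).insert u (F ((ppRA tl).getD u PySem.Dict.empty)) = _
  rw [hget, hF]
  apply PySem.Dict.ext
  rw [PySem.Dict.items_insert_of_contains _ _ hcont]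
  show List.map _ (tl.map _) = (List.map _ _).map _
  rw [List.map_map, List.map_map]
  refine List.map_congr_left (fun x hx => ?_)
  simp only [Function.comp]
  by_cases hxk : x.1 = u
  · have : x = x0 := ppKeyUnique h hx hx0 (by rw [hxk, hk0])
    subst this
    simp [hxk]
  · simp [hxk]

-- A's loop body on a rendered state is ppUpd on the model
theorem stepA_render (tl : List (String × Int × Int)) (h : (tl.map (·.1)).Nodup)
    (p : String × Int) : ppStepA (ppRA tl) p = ppRA (ppUpd tl p) := by
  have hF1 : ∀ t c : Int,
      (fun d : PySem.Dict String Int => d.insert "total" (d.getD "total" 0 + p.2))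
          (PySem.Dict.mk [("total", t), ("purchases", c)])
        = PySem.Dict.mk [("total", ((t + p.2, c) : Int × Int).1),
            ("purchases", ((t + p.2, c) : Int × Int).2)] := fun t c => rfl
  have hF2 : ∀ t c : Int,
      (fun d : PySem.Dict String Int => d.insert "purchases" (d.getD "purchases" 0 + 1))
          (PySem.Dict.mk [("total", t), ("purchases", c)])
        = PySem.Dict.mk [("total", ((t, c + 1) : Int × Int).1),
            ("purchases", ((t, c + 1) : Int × Int).2)] := fun t c => rfl
  unfold ppStepA ppUpd
  by_cases hm : p.1 ∈ tl.map (·.1)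
  · have hcont : (ppRA tl).contains p.1 = true := by
      rw [ppRA_contains]; simpa using hm
    rw [if_pos hcont]
    rw [if_pos (show (List.map (fun x => x.1) tl).contains p.1 = true by simpa using hm)]
    show (((ppRA tl).modify p.1 PySem.Dict.empty
        (fun d => d.insert "total" (d.getD "total" 0 + p.2))).modify p.1 PySem.Dict.empty
        (fun d => d.insert "purchases" (d.getD "purchases" 0 + 1))) = _
    rw [modifyA_render tl h hm _ _ hF1,
        modifyA_render _ (by rw [ppMapIf_keys tl p.1 (fun t c => (t + p.2, c))]; exact h)
          (by rw [ppMapIf_keys tl p.1 (fun t c => (t + p.2, c))]; exact hm) _ _ hF2]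
    refine congrArg ppRA ?_
    rw [List.map_map]
    refine List.map_congr_left (fun x _ => ?_)
    by_cases hx : x.1 = p.1 <;> simp [hx]
  · have hcont : (ppRA tl).contains p.1 = false := by
      rw [ppRA_contains]; simpa using hm
    rw [if_neg (show ¬ (ppRA tl).contains p.1 = true by simp [hcont])]
    rw [if_neg (show ¬ (List.map (fun x => x.1) tl).contains p.1 = true by simpa using hm)]
    show ((((ppRA tl).insert p.1
        (PySem.Dict.ofList [("total", (0:Int)), ("purchases", 0)])).modify p.1 PySem.Dict.empty
        (fun d => d.insert "total" (d.getD "total" 0 + p.2))).modify p.1 PySem.Dict.empty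
        (fun d => d.insert "purchases" (d.getD "purchases" 0 + 1))) = _
    have hins : (ppRA tl).insert p.1 (PySem.Dict.ofList [("total", (0:Int)), ("purchases", 0)])
        = ppRA (tl ++ [(p.1, 0, 0)]) := by
      apply PySem.Dict.ext
      rw [PySem.Dict.items_insert_of_not_contains _ _ hcont]
      simp [ppRA]
      rfl
    have hnd' : ((tl ++ [(p.1, (0:Int), (0:Int))]).map (·.1)).Nodup := by
      have h2 := ppUpd_nodup tl p h
      rw [ppUpd_keys, if_neg (by simpa using hm)] at h2
      simpa using h2
    have hm' : p.1 ∈ (tl ++ [(p.1, (0:Int), (0:Int))]).map (·.1) := by simp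
    rw [hins, modifyA_render _ hnd' hm' _ _ hF1,
        modifyA_render _ (by rw [ppMapIf_keys _ p.1 (fun t c => (t + p.2, c))]; exact hnd')
          (by rw [ppMapIf_keys _ p.1 (fun t c => (t + p.2, c))]; exact hm') _ _ hF2]
    refine congrArg ppRA ?_
    rw [List.map_map, List.map_append]
    have htl : List.map ((fun x => if (x.1 == p.1) = true then (x.1, x.2.1, x.2.2 + 1) else x)
          ∘ fun x => if (x.1 == p.1) = true then (x.1, x.2.1 + p.2, x.2.2) else x) tl = tl := by
      refine (List.map_congr_left (fun x hx => ?_)).trans (List.map_id tl)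
      have hx1 : x.1 ≠ p.1 := fun e => hm (e ▸ List.mem_map_of_mem hx)
      simp [Function.comp, hx1]
    rw [htl]
    simp

theorem foldA_render (sd : List (String × Int)) (tl : List (String × Int × Int))
    (h : (tl.map (·.1)).Nodup) :
    sd.foldl ppStepA (ppRA tl) = ppRA (sd.foldl ppUpd tl) := by
  induction sd generalizing tl with
  | nil => rfl
  | cons p sd ih => simp only [List.foldl_cons, stepA_render tl h p]; exact ih _ (ppUpd_nodup tl p h)

-- dict.fromkeys on a list extended by one element
theorem dedup_append_singleton (l : List String) (a : String) :
    PySem.List.dedup (l ++ [a]) = if a ∈ l then PySem.List.dedup l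
                                  else PySem.List.dedup l ++ [a] := by
  have h1 : PySem.List.dedup (l ++ [a]) = PySem.Set.add (PySem.List.dedup l) a := by
    simp only [PySem.List.dedup_eq_ofList, PySem.Set.ofList_eq_foldl, List.foldl_append,
      List.foldl_cons, List.foldl_nil]
  rw [h1]
  unfold PySem.Set.add
  by_cases hm : a ∈ l
  · simp [hm]
  · simp [hm]

-- A's fold computes B's group-by-filter model
theorem foldUpd_model (sd : List (String × Int)) : sd.foldl ppUpd [] = ppModel sd := by
  induction sd using List.reverseRecOn with
  | nil => rfl
  | append_singleton sd p ih =>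
    rw [List.foldl_append, List.foldl_cons, List.foldl_nil, ih]
    unfold ppModel ppUpd
    rw [List.map_append, List.map_cons, List.map_nil, dedup_append_singleton]
    have hkeys : ((PySem.List.dedup (sd.map (·.1))).map
        (fun u => (u, ((sd.filter (fun q => q.1 == u)).map (·.2)).sum,
          ((sd.filter (fun q => q.1 == u)).length : Int)))).map (·.1)
        = PySem.List.dedup (sd.map (·.1)) := by
      rw [List.map_map]; exact List.map_id _
    by_cases hm : p.1 ∈ sd.map (·.1)
    · have hmem : p.1 ∈ PySem.List.dedup (sd.map (·.1)) := (PySem.List.mem_dedup _ _).2 hm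
      rw [if_pos (by rw [hkeys]; simpa using hmem), if_pos hm]
      rw [List.map_map]
      refine List.map_congr_left (fun u _ => ?_)
      simp only [Function.comp]
      by_cases hu : u = p.1
      · subst hu
        simp [List.filter_append, List.sum_append]
      · have : ¬ (p.1 == u) = true := by
          simp only [beq_iff_eq]; exact fun e => hu e.symm
        simp [List.filter_append, this, hu]
    · have hmem : p.1 ∉ PySem.List.dedup (sd.map (·.1)) := fun h => hm ((PySem.List.mem_dedup _ _).1 h)
      rw [if_neg (by rw [hkeys]; simpa using hmem), if_neg hm]
      rw [List.map_append, List.map_cons, List.map_nil]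
      congr 1
      · refine List.map_congr_left (fun u hu => ?_)
        have hu' : u ∈ sd.map (·.1) := (PySem.List.mem_dedup _ _).1 hu
        have hne : ¬ (p.1 == u) = true := by
          simp only [beq_iff_eq]; rintro rfl; exact hm hu'
        simp [List.filter_append, hne]
      · have hfilt : sd.filter (fun q => q.1 == p.1) = [] := by
          rw [List.filter_eq_nil_iff]
          intro q hq
          simp only [beq_iff_eq]
          exact fun e => hm (e ▸ List.mem_map_of_mem hq)
        simp [List.filter_append, hfilt]

-- ===== VERDICT (by name: the statement is the Claim_ definition above) =====
theorem purchases_per_person_spec : Claim_equal_purchases_per_person := by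
  intro sd _
  unfold Spec_purchases_per_person purchases_per_person purchases_per_person_alt
  have hempty : (PySem.Dict.empty : PySem.Dict String (PySem.Dict String Int)) = ppRA [] := rfl
  rw [hempty, foldA_render sd [] (by simp), foldUpd_model]
  unfold ppRA ppModel
  simp only [List.map_map]
  rfl
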